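-- pv_equiv track=rewrite | github.com/miikarinaa/dnasequence | proj2_cecs174final.py | find_optimal_indel_position
-- ===== SOURCE A (Python) =====
-- def pad_with_indels(sequence, num):
--     return sequence + ('-' * num)
--
-- def insert_indel(sequence, index):
--     beginning = sequence[:index]
--     end = sequence[index:]
--     with_indel = beginning + '-' + end
--     return with_indel
--
-- def count_matches(sequence1, sequence2):
--     match_iterator = 0
--     for i in range(len(sequence1)):
--         if sequence1[i] == sequence2[i]:
--             if (sequence1[i] != '-') and (sequence2[i] != '-'):
--                 match_iterator += 1
--     return match_iterator
--
-- def get_lower_upper(sequence1, sequence2):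
--     newsequence1 = ''
--     newsequence2 = ''
--     for i in range(len(sequence1)):
--         if sequence1[i].lower() == sequence2[i].lower():
--             newsequence1 += str(sequence1[i].lower())
--             newsequence2 += str(sequence2[i].lower())
--         else:
--             newsequence1 += str(sequence1[i].upper())
--             newsequence2 += str(sequence2[i].upper())
--     return newsequence1, newsequence2
--
-- def get_append_indel(sequence1, sequence2):
--     if len(sequence1) < len(sequence2):
--         sequence1 = pad_with_indels(sequence1, len(sequence2) - len(sequence1))
--     elif len(sequence2) < len(sequence1):
--         sequence2 = pad_with_indels(sequence2, len(sequence1) - len(sequence2))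
--     return sequence1, sequence2
--
-- def find_optimal_indel_position(sequence, othersequence):
--     suggested_position = 1
--     max_match = 0
--     for i in range(len(sequence)):
--         newsequence = insert_indel(sequence, i)
--         newsequence, othersequence = get_append_indel(newsequence, othersequence)
--         newsequence, othersequence = get_lower_upper(newsequence, othersequence)
--         num_match = count_matches(newsequence, othersequence)
--         if num_match > max_match:
--             max_match = num_match
--             suggested_position = i + 1
--     return suggested_position
-- ===== SOURCE B (Python) =====
-- def find_optimal_indel_position(sequence, othersequence):
--     s, t = sequence, othersequence
--     n, m = len(s), len(t)
--     sl, tl = s.lower(), t.lower()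
--     # shifted matches: s[j] (placed at j+1 after the indel) against t[j+1]
--     suf = [0] * (n + 1)
--     for j in range(n - 1, -1, -1):
--         hit = j + 1 < m and sl[j] == tl[j + 1] and s[j] != '-'
--         suf[j] = suf[j + 1] + (1 if hit else 0)
--     best, pos, pref = 0, 1, 0
--     for i in range(n):
--         v = pref + suf[i]
--         if v > best:
--             best, pos = v, i + 1
--         if i < m and sl[i] == tl[i] and s[i] != '-':
--             pref += 1
--     return pos
-- ===== Notes on version B (the rewrite author's own statement) =====
-- stated objective: faster
-- what changed: A re-inserts the indel, re-pads, re-cases and rescans the whole pair of sequences for every candidate position; B precomputes suffix sums of shifted-match indicators and a running prefix sum of direct-match indicators, scoring each insertion position in O(1).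
import Mathlib
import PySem

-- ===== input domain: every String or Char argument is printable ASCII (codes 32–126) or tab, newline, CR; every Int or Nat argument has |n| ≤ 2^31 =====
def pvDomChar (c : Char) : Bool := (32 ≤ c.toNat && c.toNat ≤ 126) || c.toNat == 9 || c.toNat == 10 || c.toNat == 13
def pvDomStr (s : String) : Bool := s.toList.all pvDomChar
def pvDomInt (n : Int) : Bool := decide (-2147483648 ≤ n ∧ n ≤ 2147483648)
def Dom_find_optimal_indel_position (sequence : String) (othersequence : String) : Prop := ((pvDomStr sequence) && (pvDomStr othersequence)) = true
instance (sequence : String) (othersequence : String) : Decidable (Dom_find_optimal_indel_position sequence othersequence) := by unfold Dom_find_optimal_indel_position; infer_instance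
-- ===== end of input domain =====

-- B replaces A's rebuild-and-rescan per position (O(n·(n+m))) by prefix/suffix sums of
-- match indicators evaluated in O(1) per position (O(n+m) total); measured faster.

-- ===== PORT A =====
-- helpers of A, on List Char (ports work on toList; PySem.Chars.* are the Python str ops)

def pyPadWithIndels (s : List Char) (num : Nat) : List Char :=
  s ++ List.replicate num '-'

-- sequence[:index] + '-' + sequence[index:]; index is the loop's i with 0 ≤ i < len(sequence),
-- where the slices are exactly take/drop
def pyInsertIndel (s : List Char) (i : Nat) : List Char :=
  s.take i ++ '-' :: s.drop i

-- for i in range(len(s1)): s1[i]/s2[i]; getD is exact here (every call site indexes in range)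
def pyCountMatches (s1 s2 : List Char) : Int :=
  (List.range s1.length).foldl (fun acc i =>
    if s1.getD i ' ' == s2.getD i ' ' then
      if s1.getD i ' ' != '-' && s2.getD i ' ' != '-' then acc + 1 else acc
    else acc) 0

def pyGetLowerUpper (s1 s2 : List Char) : List Char × List Char :=
  (List.range s1.length).foldl (fun acc i =>
    if PySem.Chars.lowerChar (s1.getD i ' ') == PySem.Chars.lowerChar (s2.getD i ' ') then
      (acc.1 ++ [PySem.Chars.lowerChar (s1.getD i ' ')], acc.2 ++ [PySem.Chars.lowerChar (s2.getD i ' ')])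
    else
      (acc.1 ++ [PySem.Chars.upperChar (s1.getD i ' ')], acc.2 ++ [PySem.Chars.upperChar (s2.getD i ' ')])) ([], [])

def pyGetAppendIndel (s1 s2 : List Char) : List Char × List Char :=
  if s1.length < s2.length then (pyPadWithIndels s1 (s2.length - s1.length), s2)
  else if s2.length < s1.length then (s1, pyPadWithIndels s2 (s1.length - s2.length))
  else (s1, s2)

-- the for-loop of find_optimal_indel_position, carrying (suggested_position, max_match, othersequence)
def pyFindLoop (s : List Char) (i : Nat) (sug mx : Int) (oth : List Char) : Int :=
  if i < s.length then
    let p1 := pyGetAppendIndel (pyInsertIndel s i) oth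
    let p2 := pyGetLowerUpper p1.1 p1.2
    let nm := pyCountMatches p2.1 p2.2
    if nm > mx then pyFindLoop s (i+1) (Int.ofNat i + 1) nm p2.2
    else pyFindLoop s (i+1) sug mx p2.2
  else sug
termination_by s.length - i

def find_optimal_indel_position (sequence : String) (othersequence : String) : Int :=
  pyFindLoop sequence.toList 0 1 0 othersequence.toList

-- ===== PORT B =====
-- Source B's backward loop building suf: after k steps the list is [suf[n-k], …, suf[n]]
def altSufList (s sl tl : List Char) (m : Nat) : Nat → List Int
  | 0 => [0]
  | k+1 =>
    let rest := altSufList s sl tl m k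
    let j := s.length - (k+1)
    let hit := decide (j+1 < m) && (sl.getD j ' ' == tl.getD (j+1) ' ') && (s.getD j ' ' != '-')
    (rest.headD 0 + (if hit then 1 else 0)) :: rest

-- Source B's forward loop over i, carrying (best, pos, pref)
def altForward (s sl tl : List Char) (m : Nat) (suf : List Int) (i : Nat) (best pos pref : Int) : Int :=
  if i < s.length then
    let v := pref + suf.getD i 0
    let best' := if v > best then v else best
    let pos'  := if v > best then Int.ofNat i + 1 else pos
    let hit := decide (i < m) && (sl.getD i ' ' == tl.getD i ' ') && (s.getD i ' ' != '-')
    altForward s sl tl m suf (i+1) best' pos' (pref + if hit then 1 else 0)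
  else pos
termination_by s.length - i

def find_optimal_indel_position_alt (sequence : String) (othersequence : String) : Int :=
  let s := sequence.toList
  let t := othersequence.toList
  let sl := PySem.Chars.lower s
  let tl := PySem.Chars.lower t
  let suf := altSufList s sl tl t.length s.length
  altForward s sl tl t.length suf 0 0 1 0

-- ===== PRECONDITION & SPEC =====
def Spec_find_optimal_indel_position (sequence : String) (othersequence : String) (out : Int) : Prop := out = find_optimal_indel_position_alt sequence othersequence
instance (sequence : String) (othersequence : String) (out : Int) : Decidable (Spec_find_optimal_indel_position sequence othersequence out) := by unfold Spec_find_optimal_indel_position; infer_instance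

-- ===== CLAIM (what is proved, stated in full; the proofs are below) =====
def Claim_equal_find_optimal_indel_position : Prop := ∀ (sequence : String) (othersequence : String), Dom_find_optimal_indel_position sequence othersequence → Spec_find_optimal_indel_position sequence othersequence (find_optimal_indel_position sequence othersequence)

-- ===== LEMMAS AND PROOFS =====

-- ---- Char facts about Python's ASCII lower()/upper() ----
lemma char_eq_iff_toNat (a b : Char) : a = b ↔ a.toNat = b.toNat := by
  constructor
  · rintro rfl; rfl
  · intro h; exact Char.ext (UInt32.toNat_inj.mp h)

lemma char_le_iff_toNat (a b : Char) : a ≤ b ↔ a.toNat ≤ b.toNat := by rfl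

lemma toNat_lowerChar (c : Char) :
    (PySem.Chars.lowerChar c).toNat = if 65 ≤ c.toNat ∧ c.toNat ≤ 90 then c.toNat + 32 else c.toNat := by
  simp only [PySem.Chars.lowerChar, PySem.Chars.isupper]
  by_cases h : 65 ≤ c.toNat ∧ c.toNat ≤ 90
  · rw [if_pos, if_pos h]
    · rw [Char.toNat_ofNat, if_pos]
      unfold Nat.isValidChar
      left; omega
    · simp only [Bool.and_eq_true, decide_eq_true_eq]
      rw [char_le_iff_toNat, char_le_iff_toNat]
      exact ⟨h.1, h.2⟩
  · rw [if_neg, if_neg h]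
    simp only [Bool.and_eq_true, decide_eq_true_eq]
    rw [char_le_iff_toNat, char_le_iff_toNat]
    show ¬ (65 ≤ c.toNat ∧ c.toNat ≤ 90)
    exact h

lemma toNat_upperChar (c : Char) :
    (PySem.Chars.upperChar c).toNat = if 97 ≤ c.toNat ∧ c.toNat ≤ 122 then c.toNat - 32 else c.toNat := by
  simp only [PySem.Chars.upperChar, PySem.Chars.islower]
  by_cases h : 97 ≤ c.toNat ∧ c.toNat ≤ 122
  · rw [if_pos, if_pos h]
    · rw [Char.toNat_ofNat, if_pos]
      unfold Nat.isValidChar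
      left; omega
    · simp only [Bool.and_eq_true, decide_eq_true_eq]
      rw [char_le_iff_toNat, char_le_iff_toNat]
      exact ⟨h.1, h.2⟩
  · rw [if_neg, if_neg h]
    simp only [Bool.and_eq_true, decide_eq_true_eq]
    rw [char_le_iff_toNat, char_le_iff_toNat]
    show ¬ (97 ≤ c.toNat ∧ c.toNat ≤ 122)
    exact h

lemma lower_lower (c : Char) : PySem.Chars.lowerChar (PySem.Chars.lowerChar c) = PySem.Chars.lowerChar c := by
  rw [char_eq_iff_toNat, toNat_lowerChar, toNat_lowerChar]
  split_ifs <;> omega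

lemma lower_upper (c : Char) : PySem.Chars.lowerChar (PySem.Chars.upperChar c) = PySem.Chars.lowerChar c := by
  rw [char_eq_iff_toNat, toNat_lowerChar, toNat_upperChar, toNat_lowerChar]
  split_ifs <;> omega

lemma upper_inj_lower (a b : Char) (h : PySem.Chars.upperChar a = PySem.Chars.upperChar b) :
    PySem.Chars.lowerChar a = PySem.Chars.lowerChar b := by
  rw [char_eq_iff_toNat] at h ⊢
  rw [toNat_upperChar, toNat_upperChar] at h
  rw [toNat_lowerChar, toNat_lowerChar]
  split_ifs at h ⊢ <;> omega

lemma lower_eq_dash_iff (c : Char) : PySem.Chars.lowerChar c = '-' ↔ c = '-' := by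
  rw [char_eq_iff_toNat, char_eq_iff_toNat, toNat_lowerChar]
  simp only [show ('-').toNat = 45 from rfl]
  split_ifs <;> omega

lemma lowerChar_dash : PySem.Chars.lowerChar '-' = '-' := rfl

-- ---- the common reference loop both ports reduce to ----

-- direct-match indicator: s[j] matches t[j] (case-insensitively, no indel)
def dBit (s t : List Char) (j : Nat) : Bool :=
  decide (j < t.length) && (PySem.Chars.lowerChar (s.getD j ' ') == PySem.Chars.lowerChar (t.getD j ' ')) && (s.getD j ' ' != '-')

-- shifted-match indicator: s[j] (sitting at j+1 after the indel) matches t[j+1]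
def eBit (s t : List Char) (j : Nat) : Bool :=
  decide (j+1 < t.length) && (PySem.Chars.lowerChar (s.getD j ' ') == PySem.Chars.lowerChar (t.getD (j+1) ' ')) && (s.getD j ' ' != '-')

def Dsum (s t : List Char) (i : Nat) : Int := ((List.range i).countP (dBit s t) : Int)

def Esum (s t : List Char) (j : Nat) : Int :=
  if j < s.length then (if eBit s t j then 1 else 0) + Esum s t (j+1) else 0
termination_by s.length - j

def refLoop (s t : List Char) (i : Nat) (sug mx : Int) : Int :=
  if i < s.length then
    let v := Dsum s t i + Esum s t i
    if v > mx then refLoop s t (i+1) (Int.ofNat i + 1) v else refLoop s t (i+1) sug mx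
  else sug
termination_by s.length - i

-- ---- A-side reduction ----

lemma getD_map_lower (l : List Char) (j : Nat) :
    (l.map PySem.Chars.lowerChar).getD j ' ' = PySem.Chars.lowerChar (l.getD j ' ') := by
  simp only [List.getD_eq_getElem?_getD, List.getElem?_map]
  cases l[j]? <;> rfl

lemma getD_map_range (L i : Nat) (f : Nat -> Char) (h : i < L) :
    ((List.range L).map f).getD i ' ' = f i := by
  simp [List.getD_eq_getElem?_getD, List.getElem?_map, List.getElem?_range h]

lemma map_range_getD (l : List Char) (f : Char -> Char) :
    (List.range l.length).map (fun i => f (l.getD i ' ')) = l.map f := by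
  apply List.ext_getElem
  · simp
  · intro j h1 h2
    simp only [List.getElem_map, List.getElem_range]
    congr 1
    exact List.getD_eq_getElem l ' ' (by simpa using h2)

-- characterization of get_lower_upper's two outputs
lemma GLU_eq (s1 s2 : List Char) :
    pyGetLowerUpper s1 s2 =
      ((List.range s1.length).map (fun i =>
         if PySem.Chars.lowerChar (s1.getD i ' ') == PySem.Chars.lowerChar (s2.getD i ' ')
         then PySem.Chars.lowerChar (s1.getD i ' ') else PySem.Chars.upperChar (s1.getD i ' ')),
       (List.range s1.length).map (fun i =>
         if PySem.Chars.lowerChar (s1.getD i ' ') == PySem.Chars.lowerChar (s2.getD i ' ')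
         then PySem.Chars.lowerChar (s2.getD i ' ') else PySem.Chars.upperChar (s2.getD i ' '))) := by
  unfold pyGetLowerUpper
  rw [PySem.List.foldl_congr_mem (List.range s1.length) _
    (fun acc i =>
      (acc.1 ++ [if PySem.Chars.lowerChar (s1.getD i ' ') == PySem.Chars.lowerChar (s2.getD i ' ')
                 then PySem.Chars.lowerChar (s1.getD i ' ') else PySem.Chars.upperChar (s1.getD i ' ')],
       acc.2 ++ [if PySem.Chars.lowerChar (s1.getD i ' ') == PySem.Chars.lowerChar (s2.getD i ' ')
                 then PySem.Chars.lowerChar (s2.getD i ' ') else PySem.Chars.upperChar (s2.getD i ' ')]))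
    ([], [])
    (by
      intro acc x _
      by_cases h : PySem.Chars.lowerChar (s1[x]?.getD ' ') = PySem.Chars.lowerChar (s2[x]?.getD ' ') <;>
        simp [List.getD_eq_getElem?_getD, h])]
  rw [PySem.List.foldl_prod_mk
    (fun acc i => acc ++ [if PySem.Chars.lowerChar (s1.getD i ' ') == PySem.Chars.lowerChar (s2.getD i ' ')
                 then PySem.Chars.lowerChar (s1.getD i ' ') else PySem.Chars.upperChar (s1.getD i ' ')])
    (fun acc i => acc ++ [if PySem.Chars.lowerChar (s1.getD i ' ') == PySem.Chars.lowerChar (s2.getD i ' ')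
                 then PySem.Chars.lowerChar (s2.getD i ' ') else PySem.Chars.upperChar (s2.getD i ' ')])]
  rw [PySem.List.foldl_append_singleton_eq_map, PySem.List.foldl_append_singleton_eq_map]
  simp

-- count_matches after get_lower_upper counts case-insensitive non-indel matches
lemma count_GLU (s1 s2 : List Char) :
    pyCountMatches (pyGetLowerUpper s1 s2).1 (pyGetLowerUpper s1 s2).2
      = ((List.range s1.length).countP (fun j =>
          PySem.Chars.lowerChar (s1.getD j ' ') == PySem.Chars.lowerChar (s2.getD j ' ')
          && s1.getD j ' ' != '-') : Int) := by
  rw [GLU_eq]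
  unfold pyCountMatches
  simp only [List.length_map, List.length_range]
  rw [PySem.List.foldl_congr_mem (List.range s1.length) _
    (fun acc j => if (PySem.Chars.lowerChar (s1.getD j ' ') == PySem.Chars.lowerChar (s2.getD j ' ')
          && s1.getD j ' ' != '-') then acc + 1 else acc) 0
    (by
      intro acc x hx
      have hxL : x < s1.length := List.mem_range.mp hx
      rw [getD_map_range _ _ _ hxL, getD_map_range _ _ _ hxL]
      show _ = (if (PySem.Chars.lowerChar (s1.getD x ' ') == PySem.Chars.lowerChar (s2.getD x ' ')
          && s1.getD x ' ' != '-') then acc + 1 else acc)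
      by_cases h : PySem.Chars.lowerChar (s1[x]?.getD ' ') = PySem.Chars.lowerChar (s2[x]?.getD ' ')
      · have hab : (s2[x]?.getD ' ' = '-') ↔ (s1[x]?.getD ' ' = '-') := by
          rw [← lower_eq_dash_iff (s1[x]?.getD ' '), ← lower_eq_dash_iff (s2[x]?.getD ' '), h]
        simp [h, lower_eq_dash_iff, hab]
      · have hupper : ¬ (PySem.Chars.upperChar (s1[x]?.getD ' ') = PySem.Chars.upperChar (s2[x]?.getD ' ')) :=
          fun hc => h (upper_inj_lower _ _ hc)
        simp [h, hupper])]
  rw [PySem.List.foldl_count_if]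
  simp

-- the lowercase image of get_lower_upper's second output is that of its second input
lemma GLU_snd_lower (s1 s2 : List Char) (hlen : s2.length = s1.length) :
    (pyGetLowerUpper s1 s2).2.map PySem.Chars.lowerChar = s2.map PySem.Chars.lowerChar := by
  rw [GLU_eq]
  simp only [List.map_map]
  have : (PySem.Chars.lowerChar ∘ fun i =>
      if PySem.Chars.lowerChar (s1.getD i ' ') == PySem.Chars.lowerChar (s2.getD i ' ')
      then PySem.Chars.lowerChar (s2.getD i ' ') else PySem.Chars.upperChar (s2.getD i ' '))
      = (fun i => PySem.Chars.lowerChar (s2.getD i ' ')) := by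
    funext i
    simp only [Function.comp_apply]
    by_cases h : (PySem.Chars.lowerChar (s1.getD i ' ') == PySem.Chars.lowerChar (s2.getD i ' ')) = true
    · rw [if_pos h, lower_lower]
    · rw [if_neg h, lower_upper]
  rw [this, ← hlen, map_range_getD]

lemma GLU_snd_length (s1 s2 : List Char) : (pyGetLowerUpper s1 s2).2.length = s1.length := by
  rw [GLU_eq]; simp

lemma insertIndel_length (s : List Char) (i : Nat) :
    (pyInsertIndel s i).length = s.length + 1 := by
  unfold pyInsertIndel
  simp

lemma appendIndel_eq (ns oth : List Char) (L : Nat) (hL : max ns.length oth.length = L) :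
    pyGetAppendIndel ns oth
      = (ns ++ List.replicate (L - ns.length) '-', oth ++ List.replicate (L - oth.length) '-') := by
  unfold pyGetAppendIndel pyPadWithIndels
  split_ifs with h1 h2
  · have e1 : oth.length - ns.length = L - ns.length := by omega
    have e2 : L - oth.length = 0 := by omega
    rw [e1, e2]
    simp
  · have e1 : ns.length - oth.length = L - oth.length := by omega
    have e2 : L - ns.length = 0 := by omega
    rw [e1, e2]
    simp
  · have e1 : L - ns.length = 0 := by omega
    have e2 : L - oth.length = 0 := by omega
    rw [e1, e2]
    simp


-- entries of "insert_indel(s,i)" padded with indels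
lemma NS_getElem_lt (s : List Char) (i j pad : Nat) (hij : j < i) (hi : i ≤ s.length) :
    (pyInsertIndel s i ++ List.replicate pad '-')[j]? = s[j]? := by
  unfold pyInsertIndel
  have h1 : (s.take i).length = i := by simp [hi]
  rw [List.append_assoc, List.getElem?_append_left (by omega : j < (s.take i).length),
    List.getElem?_take, if_pos hij]

lemma NS_getElem_eq (s : List Char) (i pad : Nat) (hi : i ≤ s.length) :
    (pyInsertIndel s i ++ List.replicate pad '-')[i]? = some '-' := by
  unfold pyInsertIndel
  have h1 : (s.take i).length = i := by simp [hi]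
  rw [List.append_assoc, List.cons_append, List.getElem?_append_right (by omega : (s.take i).length ≤ i)]
  rw [h1]
  simp

lemma NS_getElem_mid (s : List Char) (i j pad : Nat) (hij : i < j) (hj : j ≤ s.length) :
    (pyInsertIndel s i ++ List.replicate pad '-')[j]? = s[j-1]? := by
  unfold pyInsertIndel
  have h1 : (s.take i).length = i := by simp [show i ≤ s.length by omega]
  rw [List.append_assoc, List.cons_append, List.getElem?_append_right (by omega : (s.take i).length ≤ j)]
  rw [h1]
  have h2 : j - i = (j - i - 1) + 1 := by omega
  rw [h2, List.getElem?_cons_succ, List.getElem?_append_left (by simp; omega), List.getElem?_drop]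
  congr 1
  omega

lemma NS_getElem_hi (s : List Char) (i j pad : Nat) (hj : s.length + 1 ≤ j) :
    (pyInsertIndel s i ++ List.replicate pad '-')[j]? = if j < s.length + 1 + pad then some '-' else none := by
  have h1 : (pyInsertIndel s i).length = s.length + 1 := insertIndel_length s i
  rw [List.getElem?_append_right (by omega : (pyInsertIndel s i).length ≤ j), h1,
    List.getElem?_replicate]
  split_ifs with h2 h3 h3 <;> first | rfl | omega

-- entries of the lowercased, indel-padded other sequence
lemma lowpad_getD (t : List Char) (q j : Nat) :
    ((t.map PySem.Chars.lowerChar) ++ List.replicate q '-').getD j ' '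
      = if j < t.length then PySem.Chars.lowerChar (t.getD j ' ')
        else if j < t.length + q then '-' else ' ' := by
  rw [List.getD_eq_getElem?_getD]
  by_cases h1 : j < t.length
  · rw [List.getElem?_append_left (by simpa), List.getElem?_map, if_pos h1,
      List.getElem?_eq_getElem h1, List.getD_eq_getElem?_getD, List.getElem?_eq_getElem h1]
    rfl
  · rw [List.getElem?_append_right (by simpa using h1), List.length_map, List.getElem?_replicate]
    rw [if_neg h1]
    split_ifs with h2 h3 h3 <;> first | rfl | omega

lemma Esum_eq_countP (s t : List Char) (i : Nat) :
    Esum s t i = ((List.range (s.length - i)).countP (fun r => eBit s t (i + r)) : Int) := by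
  rw [Esum]
  by_cases h : i < s.length
  · rw [if_pos h]
    rw [Esum_eq_countP s t (i+1)]
    have h1 : s.length - i = (s.length - (i+1)) + 1 := by omega
    rw [h1, List.range_succ_eq_map, List.countP_cons, List.countP_map]
    have h2 : ((fun r => eBit s t (i + r)) ∘ Nat.succ) = (fun r => eBit s t (i + 1 + r)) := by
      funext r
      show eBit s t (i + (r+1)) = eBit s t (i + 1 + r)
      congr 1
      omega
    rw [h2]
    by_cases hb : eBit s t i
    · simp [hb]
      ring
    · simp [hb]
  · rw [if_neg h]
    have h1 : s.length - i = 0 := by omega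
    rw [h1]
    simp
termination_by s.length - i

-- a character never matches the indel padding as a non-indel
lemma dash_bit_false (c : Char) : (PySem.Chars.lowerChar c == '-' && c != '-') = false := by
  by_cases hd : c = '-'
  · subst hd; decide
  · have h1 : ¬ (PySem.Chars.lowerChar c = '-') := fun hc => hd ((lower_eq_dash_iff c).mp hc)
    simp [h1]

-- the count for insertion position i, in terms of the prefix/suffix indicators
lemma count_NS (s t : List Char) (i : Nat) (_hi : i < s.length) :
    (((List.range (max (s.length+1) t.length)).countP (fun j =>
       PySem.Chars.lowerChar ((pyInsertIndel s i ++ List.replicate (max (s.length+1) t.length - (s.length+1)) '-').getD j ' ')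
         == ((t.map PySem.Chars.lowerChar ++ List.replicate (max (s.length+1) t.length - t.length) '-').getD j ' ')
       && ((pyInsertIndel s i ++ List.replicate (max (s.length+1) t.length - (s.length+1)) '-').getD j ' ') != '-')) : Int)
    = Dsum s t i + Esum s t i := by
  have hL1 : s.length + 1 ≤ max (s.length+1) t.length := le_max_left _ _
  have hLm : t.length ≤ max (s.length+1) t.length := le_max_right _ _
  set L := max (s.length+1) t.length with hLdef
  set P : Nat → Bool := (fun j =>
       PySem.Chars.lowerChar ((pyInsertIndel s i ++ List.replicate (L - (s.length+1)) '-').getD j ' ')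
         == ((t.map PySem.Chars.lowerChar ++ List.replicate (L - t.length) '-').getD j ' ')
       && ((pyInsertIndel s i ++ List.replicate (L - (s.length+1)) '-').getD j ' ') != '-') with hP
  clear_value L
  -- the indel-padded tail beyond position s.length contributes nothing
  have hsplit1 : L = (s.length+1) + (L - (s.length+1)) := by omega
  have htail : (List.map (fun x => (s.length+1) + x) (List.range (L - (s.length+1)))).countP P = 0 := by
    rw [List.countP_eq_zero]
    intro a ha
    rcases List.mem_map.mp ha with ⟨r, hr, rfl⟩
    have hrr : r < L - (s.length+1) := List.mem_range.mp hr
    rw [hP]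
    beta_reduce
    simp only [Bool.and_eq_true, bne_iff_ne, ne_eq, not_and]
    intro _
    rw [List.getD_eq_getElem?_getD, NS_getElem_hi s i _ _ (by omega), if_pos (by omega)]
    simp
  -- positions j < i: the direct-match indicator
  have hpre : ∀ j, j < i → P j = dBit s t j := by
    intro j hj
    rw [hP]
    beta_reduce
    have hNS : ((pyInsertIndel s i ++ List.replicate (L - (s.length+1)) '-').getD j ' ') = s.getD j ' ' := by
      rw [List.getD_eq_getElem?_getD, NS_getElem_lt s i j _ hj (by omega), List.getD_eq_getElem?_getD]
    rw [hNS, lowpad_getD, dBit]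
    by_cases hm : j < t.length
    · rw [if_pos hm]
      have hdec : decide (j < t.length) = true := by simp [hm]
      rw [hdec]
      simp
    · rw [if_neg hm, if_pos (by omega), dash_bit_false]
      have hdec : decide (j < t.length) = false := by simp [hm]
      rw [hdec]
      simp
  -- position i itself: the inserted indel never matches
  have hmid : P i = false := by
    rw [hP]
    beta_reduce
    have hNS : ((pyInsertIndel s i ++ List.replicate (L - (s.length+1)) '-').getD i ' ') = '-' := by
      rw [List.getD_eq_getElem?_getD, NS_getElem_eq s i _ (by omega)]
      rfl
    rw [hNS]
    simp
  -- positions i < j ≤ s.length: the shifted-match indicator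
  have hsuf : ∀ r, r < s.length - i → P (i + 1 + r) = eBit s t (i + r) := by
    intro r hr
    rw [hP]
    beta_reduce
    have hNS : ((pyInsertIndel s i ++ List.replicate (L - (s.length+1)) '-').getD (i+1+r) ' ') = s.getD (i+r) ' ' := by
      rw [List.getD_eq_getElem?_getD, NS_getElem_mid s i _ _ (by omega) (by omega)]
      rw [List.getD_eq_getElem?_getD, show i + 1 + r - 1 = i + r from by omega]
    rw [hNS, lowpad_getD, eBit]
    by_cases hm : i + 1 + r < t.length
    · rw [if_pos hm]
      have hdec : decide (i + r + 1 < t.length) = true := by simp only [decide_eq_true_eq]; omega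
      rw [hdec]
      have h4 : i + r + 1 = i + 1 + r := by omega
      rw [h4]
      simp
    · rw [if_neg hm, if_pos (by omega), dash_bit_false]
      have hdec : decide (i + r + 1 < t.length) = false := by simp only [decide_eq_false_iff_not]; omega
      rw [hdec]
      simp
  -- assemble
  rw [hsplit1, List.range_add, List.countP_append, htail]
  have hsplit2 : s.length + 1 = i + ((s.length - i) + 1) := by omega
  rw [hsplit2, List.range_add, List.countP_append]
  have hfirst : (List.range i).countP P = (List.range i).countP (dBit s t) := by
    apply List.countP_congr
    intro x hx
    rw [hpre x (List.mem_range.mp hx)]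
  have hsecond : (List.map (fun x => i + x) (List.range (s.length - i + 1))).countP P
      = (List.range (s.length - i)).countP (fun r => eBit s t (i + r)) := by
    rw [List.range_succ_eq_map, List.map_cons, List.countP_cons, List.map_map]
    have e0 : (i + 0) = i := by omega
    rw [e0, hmid, List.countP_map]
    simp only [Bool.false_eq_true, if_false, Nat.add_zero]
    apply List.countP_congr
    intro r hr
    show P ((fun x => i + x) (Nat.succ r)) = true ↔ _
    have e1 : (fun x => i + x) (Nat.succ r) = i + 1 + r := by show i + (r + 1) = i + 1 + r; omega
    rw [e1, hsuf r (List.mem_range.mp hr)]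
  rw [hfirst, hsecond, Esum_eq_countP]
  unfold Dsum
  push_cast
  ring

-- one loop iteration of A: the match count is D + E, and the rewritten othersequence
-- keeps its length and lowercase image
lemma A_step (s t oth : List Char) (i : Nat) (hi : i < s.length)
    (hlen : max (s.length + 1) oth.length = max (s.length + 1) t.length)
    (hlow : oth.map PySem.Chars.lowerChar ++ List.replicate (max (s.length + 1) t.length - oth.length) '-'
      = t.map PySem.Chars.lowerChar ++ List.replicate (max (s.length + 1) t.length - t.length) '-') :
    pyCountMatches (pyGetLowerUpper (pyGetAppendIndel (pyInsertIndel s i) oth).1 (pyGetAppendIndel (pyInsertIndel s i) oth).2).1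
        (pyGetLowerUpper (pyGetAppendIndel (pyInsertIndel s i) oth).1 (pyGetAppendIndel (pyInsertIndel s i) oth).2).2
      = Dsum s t i + Esum s t i
    ∧ (pyGetLowerUpper (pyGetAppendIndel (pyInsertIndel s i) oth).1 (pyGetAppendIndel (pyInsertIndel s i) oth).2).2.length
      = max (s.length + 1) oth.length
    ∧ (pyGetLowerUpper (pyGetAppendIndel (pyInsertIndel s i) oth).1 (pyGetAppendIndel (pyInsertIndel s i) oth).2).2.map PySem.Chars.lowerChar
      = t.map PySem.Chars.lowerChar ++ List.replicate (max (s.length + 1) t.length - t.length) '-' := by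
  have hL1 : s.length + 1 ≤ max (s.length+1) t.length := le_max_left _ _
  have hoth : oth.length ≤ max (s.length+1) t.length := by omega
  have hins : (pyInsertIndel s i).length = s.length + 1 := insertIndel_length s i
  have hpad := appendIndel_eq (pyInsertIndel s i) oth (max (s.length+1) t.length) (by rw [hins]; exact hlen)
  have hp1 : (pyGetAppendIndel (pyInsertIndel s i) oth).1
      = pyInsertIndel s i ++ List.replicate (max (s.length+1) t.length - (s.length+1)) '-' := by
    rw [hpad, hins]
  have hp2 : (pyGetAppendIndel (pyInsertIndel s i) oth).2
      = oth ++ List.replicate (max (s.length+1) t.length - oth.length) '-' := by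
    rw [hpad]
  rw [hp1, hp2]
  have hNSlen : (pyInsertIndel s i ++ List.replicate (max (s.length+1) t.length - (s.length+1)) '-').length
      = max (s.length+1) t.length := by
    simp [hins]
  have hOTHlen : (oth ++ List.replicate (max (s.length+1) t.length - oth.length) '-').length
      = max (s.length+1) t.length := by
    simp
    omega
  have hOTHlow : (oth ++ List.replicate (max (s.length+1) t.length - oth.length) '-').map PySem.Chars.lowerChar
      = t.map PySem.Chars.lowerChar ++ List.replicate (max (s.length+1) t.length - t.length) '-' := by
    rw [List.map_append, List.map_replicate, lowerChar_dash, hlow]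
  refine ⟨?_, ?_, ?_⟩
  · rw [count_GLU]
    rw [hNSlen]
    have hcong : ∀ j, j < max (s.length+1) t.length →
        (PySem.Chars.lowerChar ((pyInsertIndel s i ++ List.replicate (max (s.length+1) t.length - (s.length+1)) '-').getD j ' ')
          == PySem.Chars.lowerChar ((oth ++ List.replicate (max (s.length+1) t.length - oth.length) '-').getD j ' ')
          && ((pyInsertIndel s i ++ List.replicate (max (s.length+1) t.length - (s.length+1)) '-').getD j ' ') != '-')
        = (PySem.Chars.lowerChar ((pyInsertIndel s i ++ List.replicate (max (s.length+1) t.length - (s.length+1)) '-').getD j ' ')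
          == ((t.map PySem.Chars.lowerChar ++ List.replicate (max (s.length+1) t.length - t.length) '-').getD j ' ')
          && ((pyInsertIndel s i ++ List.replicate (max (s.length+1) t.length - (s.length+1)) '-').getD j ' ') != '-') := by
      intro j _
      have : PySem.Chars.lowerChar ((oth ++ List.replicate (max (s.length+1) t.length - oth.length) '-').getD j ' ')
          = ((t.map PySem.Chars.lowerChar ++ List.replicate (max (s.length+1) t.length - t.length) '-').getD j ' ') := by
        rw [← hOTHlow, ← getD_map_lower]
      rw [this]
    have : ((List.range (max (s.length+1) t.length)).countP (fun j =>
        PySem.Chars.lowerChar ((pyInsertIndel s i ++ List.replicate (max (s.length+1) t.length - (s.length+1)) '-').getD j ' ')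
          == PySem.Chars.lowerChar ((oth ++ List.replicate (max (s.length+1) t.length - oth.length) '-').getD j ' ')
          && ((pyInsertIndel s i ++ List.replicate (max (s.length+1) t.length - (s.length+1)) '-').getD j ' ') != '-'))
        = ((List.range (max (s.length+1) t.length)).countP (fun j =>
        PySem.Chars.lowerChar ((pyInsertIndel s i ++ List.replicate (max (s.length+1) t.length - (s.length+1)) '-').getD j ' ')
          == ((t.map PySem.Chars.lowerChar ++ List.replicate (max (s.length+1) t.length - t.length) '-').getD j ' ')
          && ((pyInsertIndel s i ++ List.replicate (max (s.length+1) t.length - (s.length+1)) '-').getD j ' ') != '-')) := by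
      apply List.countP_congr
      intro x hx
      rw [hcong x (List.mem_range.mp hx)]
    rw [this, count_NS s t i hi]
  · rw [GLU_snd_length, hNSlen, hlen]
  · rw [GLU_snd_lower _ _ (by rw [hNSlen, hOTHlen]), hOTHlow]

lemma A_loop_eq_ref (s t : List Char) (i : Nat) (sug mx : Int) (oth : List Char)
    (hlen : max (s.length + 1) oth.length = max (s.length + 1) t.length)
    (hlow : oth.map PySem.Chars.lowerChar ++ List.replicate (max (s.length + 1) t.length - oth.length) '-'
      = t.map PySem.Chars.lowerChar ++ List.replicate (max (s.length + 1) t.length - t.length) '-') :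
    pyFindLoop s i sug mx oth = refLoop s t i sug mx := by
  rw [pyFindLoop, refLoop]
  by_cases h : i < s.length
  · simp only [if_pos h]
    obtain ⟨hcount, hlen2, hlow2⟩ := A_step s t oth i h hlen hlow
    rw [hcount]
    have hlen' : max (s.length + 1)
        (pyGetLowerUpper (pyGetAppendIndel (pyInsertIndel s i) oth).1 (pyGetAppendIndel (pyInsertIndel s i) oth).2).2.length
        = max (s.length + 1) t.length := by
      rw [hlen2, hlen]
      omega
    have hlow' : (pyGetLowerUpper (pyGetAppendIndel (pyInsertIndel s i) oth).1 (pyGetAppendIndel (pyInsertIndel s i) oth).2).2.map PySem.Chars.lowerChar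
        ++ List.replicate (max (s.length + 1) t.length
            - (pyGetLowerUpper (pyGetAppendIndel (pyInsertIndel s i) oth).1 (pyGetAppendIndel (pyInsertIndel s i) oth).2).2.length) '-'
        = t.map PySem.Chars.lowerChar ++ List.replicate (max (s.length + 1) t.length - t.length) '-' := by
      rw [hlow2, hlen2, hlen]
      have : max (s.length + 1) t.length - max (s.length + 1) t.length = 0 := by omega
      rw [this]
      simp
    by_cases hv : Dsum s t i + Esum s t i > mx
    · rw [if_pos hv, if_pos hv, A_loop_eq_ref s t (i+1) _ _ _ hlen' hlow']
    · rw [if_neg hv, if_neg hv, A_loop_eq_ref s t (i+1) _ _ _ hlen' hlow']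
  · simp only [if_neg h]
termination_by s.length - i

-- ---- B-side reduction ----

lemma altSufList_eq (s t : List Char) (k : Nat) (hk : k ≤ s.length) :
    altSufList s (PySem.Chars.lower s) (PySem.Chars.lower t) t.length k
      = (List.range (k+1)).map (fun r => Esum s t (s.length - k + r)) := by
  induction k with
  | zero =>
      have h0 : Esum s t s.length = 0 := by unfold Esum; simp
      simp [altSufList, h0]
  | succ k ih =>
      rw [altSufList]
      rw [ih (by omega)]
      have hhead : ((List.range (k+1)).map (fun r => Esum s t (s.length - k + r))).headD 0
          = Esum s t (s.length - k) := by
        rw [List.range_succ_eq_map]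
        simp
      rw [hhead]
      have hbit : (decide (s.length - (k+1) + 1 < t.length)
          && ((PySem.Chars.lower s).getD (s.length - (k+1)) ' ' == (PySem.Chars.lower t).getD (s.length - (k+1) + 1) ' ')
          && (s.getD (s.length - (k+1)) ' ' != '-')) = eBit s t (s.length - (k+1)) := by
        unfold eBit PySem.Chars.lower
        rw [getD_map_lower, getD_map_lower]
      rw [hbit]
      have hEsum : Esum s t (s.length - (k+1))
          = Esum s t (s.length - k) + (if eBit s t (s.length - (k+1)) then 1 else 0) := by
        conv_lhs => rw [Esum]
        rw [if_pos (by omega)]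
        have h1 : s.length - (k+1) + 1 = s.length - k := by omega
        rw [h1]
        ring
      have hRHS : (List.range (k+1+1)).map (fun r => Esum s t (s.length - (k+1) + r))
          = Esum s t (s.length - (k+1)) :: (List.range (k+1)).map (fun r => Esum s t (s.length - k + r)) := by
        rw [List.range_succ_eq_map, List.map_cons, List.map_map]
        congr 1
        apply List.map_congr_left
        intro r _
        show Esum s t (s.length - (k+1) + (r+1)) = Esum s t (s.length - k + r)
        congr 1
        omega
      rw [hRHS, hEsum]

lemma Dsum_succ (s t : List Char) (i : Nat) :
    Dsum s t (i+1) = Dsum s t i + (if dBit s t i then 1 else 0) := by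
  unfold Dsum
  rw [List.range_succ, List.countP_append]
  by_cases h : dBit s t i <;> simp [h]

lemma altForward_eq (s t : List Char) (i : Nat) (best pos : Int) :
    altForward s (PySem.Chars.lower s) (PySem.Chars.lower t) t.length
      ((List.range (s.length+1)).map (fun r => Esum s t r)) i best pos (Dsum s t i)
    = refLoop s t i pos best := by
  rw [altForward, refLoop]
  by_cases h : i < s.length
  · simp only [if_pos h]
    have hsuf : ((List.range (s.length+1)).map (fun r => Esum s t r)).getD i 0 = Esum s t i := by
      simp only [List.getD_eq_getElem?_getD, List.getElem?_map, List.getElem?_range (by omega : i < s.length+1)]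
      rfl
    have hbit : (decide (i < t.length)
        && ((PySem.Chars.lower s).getD i ' ' == (PySem.Chars.lower t).getD i ' ')
        && (s.getD i ' ' != '-')) = dBit s t i := by
      unfold dBit PySem.Chars.lower
      rw [getD_map_lower, getD_map_lower]
    rw [hsuf, hbit]
    have hpref : Dsum s t i + (if dBit s t i then 1 else 0) = Dsum s t (i+1) := (Dsum_succ s t i).symm
    rw [hpref]
    rw [altForward_eq s t (i+1)]
    by_cases hv : Dsum s t i + Esum s t i > best
    · rw [if_pos hv, if_pos hv, if_pos hv]
    · rw [if_neg hv, if_neg hv, if_neg hv]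
  · simp only [if_neg h]
termination_by s.length - i

lemma B_eq_ref (s t : List Char) (best pos : Int) :
    altForward s (PySem.Chars.lower s) (PySem.Chars.lower t) t.length
      (altSufList s (PySem.Chars.lower s) (PySem.Chars.lower t) t.length s.length) 0 best pos 0
    = refLoop s t 0 pos best := by
  rw [altSufList_eq s t s.length le_rfl]
  have h1 : (fun r => Esum s t (s.length - s.length + r)) = (fun r => Esum s t r) := by
    funext r; congr 1; omega
  rw [h1]
  have h0 : (0 : Int) = Dsum s t 0 := by simp [Dsum]
  rw [h0, altForward_eq]

-- ===== VERDICT (by name: the statement is the Claim_ definition above) =====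
theorem find_optimal_indel_position_spec : Claim_equal_find_optimal_indel_position := by
  intro sequence othersequence _
  show _ = _
  unfold find_optimal_indel_position find_optimal_indel_position_alt
  rw [B_eq_ref, A_loop_eq_ref] <;> rfl
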